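-- pv_equiv track=rewrite | github.com/yojiyama7/python_competitive_programming | atcoder/agc/agc_034/b_abc.py | inv_num
-- ===== SOURCE A (Python) =====
-- def inv_num(l):
--     cnt = 0
--     a_cnt = 0
--     for l_i in l:
--         if l_i == "A":
--             a_cnt += 1
--         else:
--             cnt += a_cnt
--     return (cnt)
-- ===== SOURCE B (Python) =====
-- def inv_num(l):
--     l = list(l)
--     n = len(l)
--     pos = [i for i, x in enumerate(l) if x == "A"]
--     a = len(pos)
--     # the k-th "A" (0-based) at index p has (n-1-p) elements after it,
--     # of which (a-1-k) are "A"s; the rest are non-"A"s it pairs with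
--     return sum((n - 1 - p) - (a - 1 - k) for k, p in enumerate(pos))
-- ===== Notes on version B (the rewrite author's own statement) =====
-- stated objective: alternative
-- what changed: B extracts the list of indices of the 'A' characters and computes the answer by pure index arithmetic: for the k-th 'A' at index p it adds (n-1-p)-(a-1-k), the number of non-'A's after it, instead of A's single-pass running-accumulator scan.
import Mathlib
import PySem

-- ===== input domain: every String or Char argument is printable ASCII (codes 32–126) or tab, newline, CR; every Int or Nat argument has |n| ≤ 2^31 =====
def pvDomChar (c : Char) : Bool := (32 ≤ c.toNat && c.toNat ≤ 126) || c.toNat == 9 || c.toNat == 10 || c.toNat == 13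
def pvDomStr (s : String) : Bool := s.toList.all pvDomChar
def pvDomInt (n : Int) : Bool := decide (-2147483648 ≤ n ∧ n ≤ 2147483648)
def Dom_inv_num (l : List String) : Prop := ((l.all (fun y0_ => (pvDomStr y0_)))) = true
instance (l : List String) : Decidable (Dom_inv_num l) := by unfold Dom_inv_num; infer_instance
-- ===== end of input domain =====

-- B replaces A's running-accumulator scan by index arithmetic on the extracted
-- list of 'A' positions (alternative decomposition, same O(n)).

-- ===== PORT A =====
def inv_num (l : List String) : Int :=
  (l.foldl (fun s li => if li = "A" then (s.1, s.2 + 1) else (s.1 + s.2, s.2))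
    ((0 : Int), (0 : Int))).1

-- ===== PORT B =====
def inv_num_alt (l : List String) : Int :=
  let n : Int := l.length
  let pos : List Int := ((PySem.List.enumerate l 0).filter (fun p => p.2 == "A")).map (fun p => p.1)
  let a : Int := pos.length
  (((PySem.List.enumerate pos 0).map (fun kp => (n - 1 - kp.2) - (a - 1 - kp.1))).sum)

-- ===== PRECONDITION & SPEC =====
def Spec_inv_num (l : List String) (out : Int) : Prop := out = inv_num_alt l
instance (l : List String) (out : Int) : Decidable (Spec_inv_num l out) := by unfold Spec_inv_num; infer_instance

-- ===== CLAIM (what is proved, stated in full; the proofs are below) =====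
def Claim_equal_inv_num : Prop := ∀ (l : List String), Dom_inv_num l → Spec_inv_num l (inv_num l)

-- ===== LEMMAS AND PROOFS =====

-- count of "A"s, count of non-"A"s, and A's pair count (for each "A", non-"A"s after it)
def pvCA : List String → Int
  | [] => 0
  | x :: r => (if x = "A" then 1 else 0) + pvCA r

def pvNA : List String → Int
  | [] => 0
  | x :: r => (if x = "A" then 0 else 1) + pvNA r

def pvAns : List String → Int
  | [] => 0
  | x :: r => (if x = "A" then pvNA r else 0) + pvAns r

-- sum of "A" indices when numbering starts at 0 (general start handled in pvPosL_sum)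
def pvK : List String → Int
  | [] => 0
  | _ :: r => pvCA r + pvK r

-- the list of indices of "A"s, numbering from s
def pvPosL : List String → Int → List Int
  | [], _ => []
  | x :: r, s => (if x = "A" then [s] else []) ++ pvPosL r (s + 1)

-- triangular number of the length of a list
def pvTri : List Int → Int
  | [] => 0
  | _ :: q => (q.length : Int) + pvTri q

theorem foldA_eq (l : List String) : ∀ c a : Int,
    l.foldl (fun s li => if li = "A" then (s.1, s.2 + 1) else (s.1 + s.2, s.2)) (c, a)
      = (c + a * pvNA l + pvAns l, a + pvCA l) := by
  induction l with
  | nil => intro c a; simp [pvNA, pvAns, pvCA]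
  | cons x r ih =>
    intro c a
    by_cases hx : x = "A"
    · simp [hx, ih, pvNA, pvAns, pvCA, Prod.ext_iff]
      constructor <;> ring
    · simp [hx, ih, pvNA, pvAns, pvCA, Prod.ext_iff]
      ring

theorem posL_eq (l : List String) : ∀ s : Int,
    ((PySem.List.enumerate l s).filter (fun p => p.2 == "A")).map (fun p => p.1)
      = pvPosL l s := by
  induction l with
  | nil => intro s; simp [pvPosL, PySem.List.enumerate_nil]
  | cons x r ih =>
    intro s
    by_cases hx : x = "A" <;>
      simp [PySem.List.enumerate_cons, hx, pvPosL, ih]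

theorem posL_len (l : List String) : ∀ s : Int,
    ((pvPosL l s).length : Int) = pvCA l := by
  induction l with
  | nil => intro s; simp [pvPosL, pvCA]
  | cons x r ih =>
    intro s
    by_cases hx : x = "A" <;> simp [pvPosL, pvCA, hx, ih] <;> ring

theorem posL_sum (l : List String) : ∀ s : Int,
    (pvPosL l s).sum = s * pvCA l + pvK l := by
  induction l with
  | nil => intro s; simp [pvPosL, pvCA, pvK]
  | cons x r ih =>
    intro s
    by_cases hx : x = "A" <;> simp [pvPosL, pvCA, pvK, hx, ih] <;> ring

theorem tri_len_eq {q q' : List Int} (h : q.length = q'.length) : pvTri q = pvTri q' := by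
  induction q generalizing q' with
  | nil => cases q' with
    | nil => rfl
    | cons _ _ => simp at h
  | cons a t ih =>
    cases q' with
    | nil => simp at h
    | cons b t' =>
      simp only [List.length_cons, Nat.add_right_cancel_iff] at h
      simp [pvTri, h, ih h]

theorem posL_tri (l : List String) (s s' : Int) :
    pvTri (pvPosL l s) = pvTri (pvPosL l s') := by
  apply tri_len_eq
  have h1 := posL_len l s
  have h2 := posL_len l s'
  omega

theorem enumSum (c d : Int) (q : List Int) : ∀ s : Int,
    ((PySem.List.enumerate q s).map (fun kp => (c - kp.2) - (d - kp.1))).sum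
      = (q.length : Int) * (c - d) - q.sum + s * q.length + pvTri q := by
  induction q with
  | nil => intro s; simp [PySem.List.enumerate_nil, pvTri]
  | cons p q' ih =>
    intro s
    simp only [PySem.List.enumerate_cons, List.map_cons, List.sum_cons, ih,
      List.length_cons, List.sum_cons, pvTri]
    push_cast
    ring

theorem na_ca_len (l : List String) : pvNA l + pvCA l = (l.length : Int) := by
  induction l with
  | nil => simp [pvNA, pvCA]
  | cons x r ih =>
    by_cases hx : x = "A" <;> simp [pvNA, pvCA, hx] <;> push_cast <;> omega

-- the central identity: A's pair count from the index-arithmetic quantities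
theorem ans_formula (l : List String) :
    pvAns l = pvCA l * ((l.length : Int) - pvCA l) - pvK l + pvTri (pvPosL l 0) := by
  induction l with
  | nil => simp [pvAns, pvCA, pvK, pvPosL, pvTri]
  | cons x r ih =>
    have hna := na_ca_len r
    by_cases hx : x = "A"
    · subst hx
      have h1 : pvPosL ("A" :: r) 0 = 0 :: pvPosL r 1 := by norm_num [pvPosL]
      have htri : pvTri (pvPosL ("A" :: r) 0) = pvCA r + pvTri (pvPosL r 0) := by
        rw [h1]; simp only [pvTri]; rw [posL_len r 1, posL_tri r 1 0]
      simp only [pvAns, pvCA, pvK, List.length_cons, htri, ih]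
      push_cast
      ring_nf
      linarith [hna]
    · have htri : pvTri (pvPosL (x :: r) 0) = pvTri (pvPosL r 0) := by
        have h1 : pvPosL (x :: r) 0 = pvPosL r 1 := by simp [pvPosL, hx]
        rw [h1]; exact posL_tri r 1 0
      simp only [pvAns, pvCA, pvK, if_neg hx, List.length_cons, htri, ih]
      push_cast
      ring

-- ===== VERDICT (by name: the statement is the Claim_ definition above) =====
theorem inv_num_spec : Claim_equal_inv_num := by
  intro l _
  unfold Spec_inv_num inv_num inv_num_alt
  rw [foldA_eq]
  simp only [posL_eq l 0]
  rw [show (fun kp : Int × Int => ((l.length : Int) - 1 - kp.2) - (((pvPosL l 0).length : Int) - 1 - kp.1))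
        = (fun kp : Int × Int => (((l.length : Int) - 1) - kp.2) - ((((pvPosL l 0).length : Int) - 1) - kp.1)) from rfl]
  rw [enumSum ((l.length : Int) - 1) (((pvPosL l 0).length : Int) - 1) (pvPosL l 0) 0]
  rw [posL_sum l 0, posL_len l 0, ans_formula l]
  ring
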